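-- pv_equiv track=rewrite | github.com/JSurmont/AI_tic_Tac_Toe | aitictactoe/tictactoe_tools.py | transpose_index_1d_to2d_board
-- ===== SOURCE A (Python) =====
-- _MOVES = {'1 1', '1 2', '1 3', '2 1', '2 2', '2 3', '3 1', '3 2', '3 3'}
--
-- def transpose_index_1d_to2d_board(move_1d: int, board_2d: [[str]]) -> _MOVES:
--     cell_counter = 0
--     cell_2d = ""
--     for i, line in enumerate(board_2d):
--         for j, cell in enumerate(line):
--             if cell_counter == move_1d:
--                 line_index = i + 1
--                 column_index = j + 1
--                 cell_2d = f"{line_index} {column_index}"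
--                 return cell_2d
--             cell_counter += 1
--     return cell_2d
-- ===== SOURCE B (Python) =====
-- def transpose_index_1d_to2d_board(move_1d: int, board_2d) -> str:
--     rem = move_1d
--     for i, line in enumerate(board_2d):
--         if 0 <= rem < len(line):
--             return f"{i + 1} {rem + 1}"
--         rem -= len(line)
--     return ""
-- ===== Notes on version B (the rewrite author's own statement) =====
-- stated objective: simpler
-- what changed: Single loop over rows subtracting each row's length from a remainder, instead of a nested loop incrementing a per-cell counter.
import Mathlib
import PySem

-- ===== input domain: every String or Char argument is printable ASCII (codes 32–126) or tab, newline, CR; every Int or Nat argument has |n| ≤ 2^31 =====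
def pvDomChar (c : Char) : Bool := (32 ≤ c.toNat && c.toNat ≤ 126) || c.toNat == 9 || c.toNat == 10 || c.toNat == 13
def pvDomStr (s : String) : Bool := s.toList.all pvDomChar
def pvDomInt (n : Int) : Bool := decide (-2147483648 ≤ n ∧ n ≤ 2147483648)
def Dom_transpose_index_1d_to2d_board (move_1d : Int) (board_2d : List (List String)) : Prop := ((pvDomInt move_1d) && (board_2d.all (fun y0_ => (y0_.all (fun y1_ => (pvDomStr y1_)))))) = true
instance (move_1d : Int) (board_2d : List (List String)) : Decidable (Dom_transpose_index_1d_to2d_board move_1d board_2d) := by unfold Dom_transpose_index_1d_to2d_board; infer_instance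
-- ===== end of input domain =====

-- B replaces A's nested per-cell counter loop by a single loop over rows that subtracts each row's length from a remainder (objective: simpler).
-- ===== PORT A =====
-- inner loop over one row: returns (some cell_2d) on a match, else (none, updated counter)
def pvInnerA (move_1d : Int) (i : Nat) : List String → Nat → Nat → Option String × Nat
  | [], _, c => (none, c)
  | _ :: cs, j, c =>
      if (c : Int) = move_1d then
        (some (PySem.Int.toStr ((i : Int) + 1) ++ " " ++ PySem.Int.toStr ((j : Int) + 1)), c)
      else pvInnerA move_1d i cs (j + 1) (c + 1)

def pvOuterA (move_1d : Int) : List (List String) → Nat → Nat → String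
  | [], _, _ => ""
  | line :: rest, i, c =>
      match pvInnerA move_1d i line 0 c with
      | (some s, _) => s
      | (none, c') => pvOuterA move_1d rest (i + 1) c'

def transpose_index_1d_to2d_board (move_1d : Int) (board_2d : List (List String)) : String :=
  pvOuterA move_1d board_2d 0 0

-- ===== PORT B =====
def pvGoB : List (List String) → Nat → Int → String
  | [], _, _ => ""
  | line :: rest, i, rem =>
      if 0 ≤ rem ∧ rem < (line.length : Int) then
        PySem.Int.toStr ((i : Int) + 1) ++ " " ++ PySem.Int.toStr (rem + 1)
      else pvGoB rest (i + 1) (rem - (line.length : Int))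

def transpose_index_1d_to2d_board_alt (move_1d : Int) (board_2d : List (List String)) : String :=
  pvGoB board_2d 0 move_1d

-- ===== PRECONDITION & SPEC =====
def Spec_transpose_index_1d_to2d_board (move_1d : Int) (board_2d : List (List String)) (out : String) : Prop := out = transpose_index_1d_to2d_board_alt move_1d board_2d
instance (move_1d : Int) (board_2d : List (List String)) (out : String) : Decidable (Spec_transpose_index_1d_to2d_board move_1d board_2d out) := by unfold Spec_transpose_index_1d_to2d_board; infer_instance

-- ===== CLAIM (what is proved, stated in full; the proofs are below) =====
def Claim_equal_transpose_index_1d_to2d_board : Prop := ∀ (move_1d : Int) (board_2d : List (List String)), Dom_transpose_index_1d_to2d_board move_1d board_2d → Spec_transpose_index_1d_to2d_board move_1d board_2d (transpose_index_1d_to2d_board move_1d board_2d)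

-- ===== LEMMAS AND PROOFS =====

-- ===== VERDICT (by name: the statement is the Claim_ definition above) =====
-- inner loop: a match happens iff c ≤ move_1d < c + row length
theorem pvInnerA_some (move_1d : Int) (i : Nat) :
    ∀ (cs : List String) (j c : Nat), (c : Int) ≤ move_1d → move_1d < (c : Int) + cs.length →
    pvInnerA move_1d i cs j c =
      (some (PySem.Int.toStr ((i : Int) + 1) ++ " " ++ PySem.Int.toStr ((j : Int) + (move_1d - c) + 1)),
       move_1d.toNat) := by
  intro cs
  induction cs with
  | nil => intro j c h1 h2; simp at h2; omega
  | cons a cs ih =>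
    intro j c h1 h2
    simp only [List.length_cons] at h2
    push_cast at h2
    simp only [pvInnerA]
    by_cases h : (c : Int) = move_1d
    · rw [if_pos h, ← h]
      norm_num
    · rw [if_neg h, ih (j+1) (c+1) (by push_cast; omega) (by push_cast; omega)]
      congr 3
      push_cast
      ring

theorem pvInnerA_none (move_1d : Int) (i : Nat) :
    ∀ (cs : List String) (j c : Nat), ¬ ((c : Int) ≤ move_1d ∧ move_1d < (c : Int) + cs.length) →
    pvInnerA move_1d i cs j c = (none, c + cs.length) := by
  intro cs
  induction cs with
  | nil => intro j c _; simp [pvInnerA]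
  | cons a cs ih =>
    intro j c h
    simp only [List.length_cons] at h
    push_cast at h
    simp only [pvInnerA]
    rw [if_neg (by omega), ih (j+1) (c+1) (by push_cast; omega)]
    simp only [List.length_cons]
    congr 1
    omega

theorem pvOuter_eq_goB (move_1d : Int) :
    ∀ (b : List (List String)) (i c : Nat),
    pvOuterA move_1d b i c = pvGoB b i (move_1d - c) := by
  intro b
  induction b with
  | nil => intro i c; rfl
  | cons line rest ih =>
    intro i c
    simp only [pvOuterA, pvGoB]
    by_cases h : (c : Int) ≤ move_1d ∧ move_1d < (c : Int) + line.length
    · obtain ⟨h1, h2⟩ := h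
      rw [pvInnerA_some move_1d i line 0 c h1 h2]
      rw [if_pos ⟨by omega, by omega⟩]
      simp only
      congr 2
      push_cast
      ring
    · rw [pvInnerA_none move_1d i line 0 c h]
      rw [if_neg (fun hc => h ⟨by omega, by omega⟩)]
      simp only
      rw [ih (i+1) (c + line.length)]
      congr 1
      push_cast
      ring

theorem transpose_index_1d_to2d_board_spec : Claim_equal_transpose_index_1d_to2d_board := by
  intro move_1d board_2d _
  unfold Spec_transpose_index_1d_to2d_board transpose_index_1d_to2d_board transpose_index_1d_to2d_board_alt
  rw [pvOuter_eq_goB]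
  norm_num
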